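-- pv_equiv track=rewrite | github.com/cjcjameson/prediction-game | prediction-possibilities.py | winners
-- ===== SOURCE A (Python) =====
-- predictions = {
--         'tr': [13,1,11,8,7,3,16,9,5,15,4,17,12,10,6,19,14,2,18],
--         'ma': [14,13,10,11,15,12,2,9,8,1,7,17,16,5,4,3,18,6,19],
--         'su': [19,12,8,15,14,6,9,4,2,7,11,17,16,10,3,1,13,5,18],
--         'jj': [9,13,7,6,5,4,2,11,18,3,8,19,1,16,12,10,17,14,15],
--         'ps': [15,2,8,9,18,3,17,4,6,7,10,13,12,14,5,11,16,1,19],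
--         'jc': [13,4,18,1,2,10,9,16,15,11,12,14,17,6,8,5,19,3,7],
--         'cj': [6,8,7,16,17,13,1,2,14,3,4,18,9,10,5,19,15,12,11],
--         'nt': [4,3,17,1,11,7,18,2,19,6,5,9,12,8,14,16,15,13,10],
--         'le': [1,8,7,6,15,16,14,17,18,2,12,19,11,9,5,4,13,3,10],
--         'dj': [19,1,13,7,6,15,18,4,2,17,8,14,16,11,3,9,10,12,5],
--         'mm': [19,15,8,17,9,16,14,10,7,11,6,12,5,13,3,4,18,1,2],
--         'am': [7,9,11,6,16,19,10,13,14,12,8,5,18,2,17,1,4,15,3],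
--         }
--
-- def winners(outcomes):
--     if 'm' not in outcomes:
--         points_per_prediction = {k: points(v, outcomes) for k, v in predictions.items()}
--         max_points = max(points_per_prediction.values())
--         possible_winners = []
--         for predictor, persons_points in points_per_prediction.items():
--             if persons_points==max_points:
--                 possible_winners.append(predictor)
--         if len(possible_winners)==1:
--             return {''.join(outcomes): possible_winners[0]}
--         else:
--             return {''.join(outcomes): 'tie'}
--     else:
--         first_maybe = outcomes.index('m')
--         its_a_yes = list(outcomes)
--         its_a_yes[first_maybe]='y'
--         yes_outcomes = winners(its_a_yes)
--
--         its_a_no = list(outcomes)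
--         its_a_no[first_maybe]='n'
--         no_outcomes = winners(its_a_no)
--
--         return {**yes_outcomes, **no_outcomes}
--
-- def points(rankings, outcomes):
--     total = 0
--     for ranking, outcome in zip(rankings, outcomes):
--         if outcome == 'y':
--             total += ranking
--     return total
-- ===== SOURCE B (Python) =====
-- predictions = {
--         'tr': [13,1,11,8,7,3,16,9,5,15,4,17,12,10,6,19,14,2,18],
--         'ma': [14,13,10,11,15,12,2,9,8,1,7,17,16,5,4,3,18,6,19],
--         'su': [19,12,8,15,14,6,9,4,2,7,11,17,16,10,3,1,13,5,18],
--         'jj': [9,13,7,6,5,4,2,11,18,3,8,19,1,16,12,10,17,14,15],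
--         'ps': [15,2,8,9,18,3,17,4,6,7,10,13,12,14,5,11,16,1,19],
--         'jc': [13,4,18,1,2,10,9,16,15,11,12,14,17,6,8,5,19,3,7],
--         'cj': [6,8,7,16,17,13,1,2,14,3,4,18,9,10,5,19,15,12,11],
--         'nt': [4,3,17,1,11,7,18,2,19,6,5,9,12,8,14,16,15,13,10],
--         'le': [1,8,7,6,15,16,14,17,18,2,12,19,11,9,5,4,13,3,10],
--         'dj': [19,1,13,7,6,15,18,4,2,17,8,14,16,11,3,9,10,12,5],
--         'mm': [19,15,8,17,9,16,14,10,7,11,6,12,5,13,3,4,18,1,2],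
--         'am': [7,9,11,6,16,19,10,13,14,12,8,5,18,2,17,1,4,15,3],
--         }
--
-- def winners(outcomes):
--     maybe_idx = [i for i, o in enumerate(outcomes) if o == 'm']
--     assignments = [[]]
--     for _ in maybe_idx:
--         assignments = [a + [v] for a in assignments for v in ('y', 'n')]
--     result = {}
--     for a in assignments:
--         completed = list(outcomes)
--         for i, v in zip(maybe_idx, a):
--             completed[i] = v
--         scores = [(k, sum(r for r, o in zip(v, completed) if o == 'y'))
--                   for k, v in predictions.items()]
--         best = max(s for _, s in scores)
--         top = [k for k, s in scores if s == best]
--         result[''.join(completed)] = top[0] if len(top) == 1 else 'tie'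
--     return result
-- ===== Notes on version B (the rewrite author's own statement) =====
-- stated objective: alternative
-- what changed: B replaces A's recursion on the first 'm' with dict-merging of the two subresults by a single iterative enumeration: it collects the 'm' indices once, builds all y/n assignments as an iteratively expanded product, fills each completion into a copy of outcomes and scores it with comprehensions, assembling one flat result dict in a single loop.
import Mathlib
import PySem

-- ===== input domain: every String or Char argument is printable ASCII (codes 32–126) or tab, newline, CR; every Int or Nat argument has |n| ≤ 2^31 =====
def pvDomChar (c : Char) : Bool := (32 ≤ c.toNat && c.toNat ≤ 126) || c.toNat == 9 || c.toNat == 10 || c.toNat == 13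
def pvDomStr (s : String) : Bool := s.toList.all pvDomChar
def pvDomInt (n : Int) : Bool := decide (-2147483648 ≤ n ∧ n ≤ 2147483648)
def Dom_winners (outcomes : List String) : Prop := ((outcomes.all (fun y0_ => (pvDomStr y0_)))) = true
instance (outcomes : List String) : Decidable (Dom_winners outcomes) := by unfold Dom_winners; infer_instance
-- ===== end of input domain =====

-- B replaces A's recursion-and-dict-merge with one iterative enumeration of all y/n completions; same results (objective: alternative).

-- ===== PORT A =====
def predictions : List (String × List Int) := [
  ("tr", [13,1,11,8,7,3,16,9,5,15,4,17,12,10,6,19,14,2,18]),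
  ("ma", [14,13,10,11,15,12,2,9,8,1,7,17,16,5,4,3,18,6,19]),
  ("su", [19,12,8,15,14,6,9,4,2,7,11,17,16,10,3,1,13,5,18]),
  ("jj", [9,13,7,6,5,4,2,11,18,3,8,19,1,16,12,10,17,14,15]),
  ("ps", [15,2,8,9,18,3,17,4,6,7,10,13,12,14,5,11,16,1,19]),
  ("jc", [13,4,18,1,2,10,9,16,15,11,12,14,17,6,8,5,19,3,7]),
  ("cj", [6,8,7,16,17,13,1,2,14,3,4,18,9,10,5,19,15,12,11]),
  ("nt", [4,3,17,1,11,7,18,2,19,6,5,9,12,8,14,16,15,13,10]),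
  ("le", [1,8,7,6,15,16,14,17,18,2,12,19,11,9,5,4,13,3,10]),
  ("dj", [19,1,13,7,6,15,18,4,2,17,8,14,16,11,3,9,10,12,5]),
  ("mm", [19,15,8,17,9,16,14,10,7,11,6,12,5,13,3,4,18,1,2]),
  ("am", [7,9,11,6,16,19,10,13,14,12,8,5,18,2,17,1,4,15,3])]

-- A's helper `points`: loop over zip(rankings, outcomes) adding ranking when outcome == 'y'
def pointsA (rankings : List Int) (outcomes : List String) : Int :=
  (rankings.zip outcomes).foldl (fun total p => if p.2 == "y" then total + p.1 else total) 0

-- termination helpers for the port of A (cited by decreasing_by)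
theorem pv_set_append_cons (pre suf : List String) (c x : String) :
    (pre ++ c :: suf).set pre.length x = pre ++ x :: suf := by
  induction pre with
  | nil => rfl
  | cons h t ih => simp [List.set_cons_succ, ih]

theorem pv_count_set_lt (o : List String) (x : String) (hx : x ≠ "m") (h : "m" ∈ o) :
    (o.set ((PySem.List.index? o "m").getD 0) x).count "m" < o.count "m" := by
  obtain ⟨j, hj⟩ := Option.isSome_iff_exists.mp ((PySem.List.index?_isSome_iff o "m").mpr h)
  obtain ⟨pre, suf, ho, hlen, hpre⟩ := (PySem.List.index?_eq_some_iff o "m" j).mp hj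
  subst ho hlen
  rw [hj]
  simp only [Option.getD_some, pv_set_append_cons]
  simp [List.count_append, hx]

def winners (o : List String) : List (String × String) :=
  if hm : "m" ∉ o then
    -- dict comprehension {k: points(v, outcomes)}
    let ppp := predictions.map (fun kv => (kv.1, pointsA kv.2 o))
    -- max(...values()); the list has 12 entries so Python's max cannot raise; `.getD 0` is unreachable
    let maxPts := (PySem.List.max? (ppp.map Prod.snd) (fun v => v)).getD 0
    let pw := ppp.foldl (fun acc p => if p.2 == maxPts then acc ++ [p.1] else acc) ([] : List String)
    if pw.length == 1 then
      [(PySem.Str.join "" o, pw.headD "")]  -- possible_winners[0]; in this branch pw has one element, headD is exact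
    else
      [(PySem.Str.join "" o, "tie")]
  else
    -- outcomes.index('m'); 'm' ∈ o so index? is some, `.getD 0` is unreachable
    let i := (PySem.List.index? o "m").getD 0
    let yes := winners (o.set i "y")
    let no := winners (o.set i "n")
    -- {**yes, **no}: insert every item of `no` into `yes`
    (no.foldl (fun d kv => d.insert kv.1 kv.2) (PySem.Dict.mk yes)).items
termination_by o.count "m"
decreasing_by
  · exact pv_count_set_lt o "y" (by decide) (by simpa using hm)
  · exact pv_count_set_lt o "n" (by decide) (by simpa using hm)

-- ===== PORT B =====
-- sum(r for r, o in zip(v, completed) if o == 'y')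
def scoreB (rankings : List Int) (completed : List String) : Int :=
  (((rankings.zip completed).filter (fun p => p.2 == "y")).map Prod.fst).sum

-- the loop body computing the winner of one completed outcome list
def champB (completed : List String) : String :=
  let scores := predictions.map (fun kv => (kv.1, scoreB kv.2 completed))
  -- max(s for _, s in scores); scores has 12 entries so max cannot raise; `.getD 0` unreachable
  let best := (PySem.List.max? (scores.map Prod.snd) (fun s => s)).getD 0
  let top := (scores.filter (fun p => p.2 == best)).map Prod.fst
  if top.length == 1 then top.headD "" else "tie"  -- top[0] exact in the length-1 branch

def winners_alt (o : List String) : List (String × String) :=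
  let idx := ((PySem.List.enumerate o).filter (fun p => p.2 == "m")).map Prod.fst
  let assignments := idx.foldl
    (fun acc _ => acc.flatMap (fun a => [a ++ ["y"], a ++ ["n"]])) [([] : List String)]
  (assignments.foldl (fun d a =>
      let completed := (idx.zip a).foldl (fun c p => PySem.List.pySetD c p.1 p.2) o
      d.insert (PySem.Str.join "" completed) (champB completed))
    (PySem.Dict.mk [])).items

-- ===== PRECONDITION & SPEC =====
def Spec_winners (outcomes : List String) (out : List (String × String)) : Prop := out = winners_alt outcomes
instance (outcomes : List String) (out : List (String × String)) : Decidable (Spec_winners outcomes out) := by unfold Spec_winners; infer_instance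

-- ===== CLAIM (what is proved, stated in full; the proofs are below) =====
def Claim_equal_winners : Prop := ∀ (outcomes : List String), Dom_winners outcomes → Spec_winners outcomes (winners outcomes)

-- ===== LEMMAS AND PROOFS =====

-- indices of the "m" entries, starting at offset k
def midx (k : Nat) : List String → List Nat
  | [] => []
  | s :: t => if s = "m" then k :: midx (k+1) t else midx (k+1) t

-- all y/n assignment lists of length n, y-first order
def asgn : Nat → List (List String)
  | 0 => [[]]
  | n+1 => (asgn n).flatMap (fun a => [a ++ ["y"], a ++ ["n"]])

def fillN (o : List String) (idx : List Nat) (a : List String) : List String :=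
  (idx.zip a).foldl (fun c p => c.set p.1 p.2) o

def entryOf (o : List String) (idx : List Nat) (a : List String) : String × String :=
  (PySem.Str.join "" (fillN o idx a), champB (fillN o idx a))

def entries (o : List String) : List (String × String) :=
  (asgn (midx 0 o).length).map (entryOf o (midx 0 o))

theorem midx_append (k : Nat) (u v : List String) :
    midx k (u ++ v) = midx k u ++ midx (k + u.length) v := by
  induction u generalizing k with
  | nil => simp [midx]
  | cons h t ih =>
    simp only [List.cons_append, midx]
    split <;> simp [ih, Nat.add_assoc, Nat.add_comm 1]

theorem midx_eq_nil (k : Nat) (u : List String) (h : "m" ∉ u) : midx k u = [] := by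
  induction u generalizing k with
  | nil => rfl
  | cons a t ih =>
    simp only [List.mem_cons, not_or] at h
    simp [midx, Ne.symm h.1, ih _ h.2]

theorem midx_bounds (k : Nat) (u : List String) : ∀ i ∈ midx k u, k ≤ i ∧ i < k + u.length := by
  induction u generalizing k with
  | nil => simp [midx]
  | cons a t ih =>
    intro i hi
    simp only [midx] at hi
    split at hi
    · rcases List.mem_cons.mp hi with rfl | hi
      · simp
      · have := ih _ _ hi; constructor <;> [omega; (simp; omega)]
    · have := ih _ _ hi; constructor <;> [omega; (simp; omega)]

theorem midx_pairwise (k : Nat) (u : List String) : (midx k u).Pairwise (· < ·) := by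
  induction u generalizing k with
  | nil => exact List.Pairwise.nil
  | cons a t ih =>
    simp only [midx]
    split
    · exact List.Pairwise.cons (fun i hi => (midx_bounds _ _ i hi).1) (ih _)
    · exact ih _

theorem flatMap_map_cons (x : String) (A : List (List String)) :
    (A.map (x :: ·)).flatMap (fun a => [a ++ ["y"], a ++ ["n"]])
      = (A.flatMap (fun a => [a ++ ["y"], a ++ ["n"]])).map (x :: ·) := by
  induction A with
  | nil => rfl
  | cons a t ih => simp_all

theorem asgn_succ (n : Nat) :
    asgn (n+1) = (asgn n).map ("y" :: ·) ++ (asgn n).map ("n" :: ·) := by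
  induction n with
  | zero => rfl
  | succ n ih =>
    conv_lhs => rw [show asgn (n+2) = (asgn (n+1)).flatMap (fun a => [a ++ ["y"], a ++ ["n"]]) from rfl, ih]
    rw [List.flatMap_append, flatMap_map_cons, flatMap_map_cons]
    rfl

theorem asgn_length (n : Nat) : ∀ a ∈ asgn n, a.length = n := by
  induction n with
  | zero => simp [asgn]
  | succ n ih =>
    rw [asgn_succ]
    intro a ha
    rcases List.mem_append.mp ha with h | h <;>
      · obtain ⟨b, hb, rfl⟩ := List.mem_map.mp h
        simp [ih b hb]

theorem asgn_mem_yn (n : Nat) : ∀ a ∈ asgn n, ∀ x ∈ a, x = "y" ∨ x = "n" := by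
  induction n with
  | zero => simp [asgn]
  | succ n ih =>
    rw [asgn_succ]
    intro a ha
    rcases List.mem_append.mp ha with h | h <;>
      · obtain ⟨b, hb, rfl⟩ := List.mem_map.mp h
        intro x hx
        rcases List.mem_cons.mp hx with rfl | hx
        · simp
        · exact ih b hb x hx

theorem asgn_nodup (n : Nat) : (asgn n).Nodup := by
  induction n with
  | zero => simp [asgn]
  | succ n ih =>
    rw [asgn_succ]
    refine List.Nodup.append (ih.map (by intro a b h; simpa using h))
      (ih.map (by intro a b h; simpa using h)) ?_
    intro a ha hb
    obtain ⟨b, _, rfl⟩ := List.mem_map.mp ha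
    obtain ⟨c, _, hc⟩ := List.mem_map.mp hb
    simp at hc

theorem foldl_expand (l : List Int) (n : Nat) :
    l.foldl (fun acc _ => acc.flatMap (fun a => [a ++ ["y"], a ++ ["n"]])) (asgn n)
      = asgn (n + l.length) := by
  induction l generalizing n with
  | nil => simp
  | cons h t ih =>
    show List.foldl _ (asgn (n+1)) t = _
    rw [ih]
    congr 1
    simp
    omega

theorem fillN_cons (o : List String) (i : Nat) (idx : List Nat) (x : String) (a : List String) :
    fillN o (i :: idx) (x :: a) = fillN (o.set i x) idx a := rfl

theorem fillN_length (o : List String) (idx : List Nat) (a : List String) :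
    (fillN o idx a).length = o.length := by
  induction idx generalizing o a with
  | nil => rfl
  | cons i t ih =>
    cases a with
    | nil => rfl
    | cons x a => rw [fillN_cons, ih, List.length_set]

theorem fillN_get_notmem (o : List String) (idx : List Nat) (a : List String) (j : Nat)
    (hj : j ∉ idx) : (fillN o idx a)[j]? = o[j]? := by
  induction idx generalizing o a with
  | nil => rfl
  | cons i t ih =>
    cases a with
    | nil => rfl
    | cons x a =>
      simp only [List.mem_cons, not_or] at hj
      rw [fillN_cons, ih _ _ hj.2, List.getElem?_set_ne (Ne.symm hj.1)]

theorem fillN_get_at (o : List String) (idx : List Nat) (a : List String)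
    (hnd : idx.Nodup) (t : Nat) (ht : t < idx.length) (ht2 : t < a.length)
    (hb : idx[t] < o.length) : (fillN o idx a)[idx[t]]? = some a[t] := by
  induction idx generalizing o a t with
  | nil => simp at ht
  | cons i rest ih =>
    cases a with
    | nil => simp at ht2
    | cons x a =>
      rw [fillN_cons]
      cases t with
      | zero =>
        simp only [List.getElem_cons_zero]
        rw [fillN_get_notmem _ _ _ _ (by simpa using (List.nodup_cons.mp hnd).1)]
        simp only [List.getElem_cons_zero] at hb
        simp [hb]
      | succ t =>
        simp only [List.getElem_cons_succ]
        exact ih _ _ (List.nodup_cons.mp hnd).2 t (by simpa using ht) (by simpa using ht2)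
          (by simpa using hb)

theorem intercalate_nil_flatten (l : List (List Char)) : [].intercalate l = l.flatten := by
  induction l with
  | nil => rfl
  | cons a t ih => cases t with
    | nil => simp [List.intercalate]
    | cons b t2 => simp_all [List.intercalate]

-- join "" cs is flatten of char lists
theorem join_toList (cs : List String) :
    (PySem.Str.join "" cs).toList = (cs.map String.toList).flatten := by
  simp [PySem.Str.join, PySem.Chars.join, intercalate_nil_flatten]

theorem flatten_inj (l1 l2 : List (List Char))
    (hlen : l1.length = l2.length)
    (hpt : ∀ t (h1 : t < l1.length) (h2 : t < l2.length), l1[t].length = l2[t].length)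
    (h : l1.flatten = l2.flatten) : l1 = l2 := by
  induction l1 generalizing l2 with
  | nil => cases l2 with | nil => rfl | cons b t2 => simp at hlen
  | cons a t1 ih =>
    cases l2 with
    | nil => simp at hlen
    | cons b t2 =>
      simp only [List.flatten_cons] at h
      have hab : a.length = b.length := hpt 0 (by simp) (by simp)
      obtain ⟨h1, h2⟩ := List.append_inj h hab
      subst h1
      have := ih t2 (by simpa using hlen)
        (fun t ht1 ht2 => hpt (t+1) (by simpa using ht1) (by simpa using ht2)) h2
      rw [this]

-- two different assignments give different joined keys
theorem keys_inj (o : List String) (a a' : List String)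
    (ha : a ∈ asgn (midx 0 o).length) (ha' : a' ∈ asgn (midx 0 o).length)
    (hk : PySem.Str.join "" (fillN o (midx 0 o) a) = PySem.Str.join "" (fillN o (midx 0 o) a')) :
    a = a' := by
  set idx := midx 0 o with hidx
  have hnd : idx.Nodup := (midx_pairwise 0 o).nodup
  have hbnd : ∀ i ∈ idx, i < o.length := fun i hi => by
    have := (midx_bounds 0 o i hi).2; omega
  have hla : a.length = idx.length := asgn_length _ a ha
  have hla' : a'.length = idx.length := asgn_length _ a' ha'
  -- the two filled lists are equal
  have hfl : fillN o idx a = fillN o idx a' := by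
    have hmaps : (fillN o idx a).map String.toList = (fillN o idx a').map String.toList := by
      apply flatten_inj
      · simp [fillN_length]
      · intro t h1 h2
        simp only [List.length_map, fillN_length] at h1 h2
        simp only [List.getElem_map]
        by_cases hmem : t ∈ idx
        · obtain ⟨r, hr, hrt⟩ := List.mem_iff_getElem.mp hmem
          subst hrt
          have e1 : (fillN o idx a)[idx[r]]'(by rw [fillN_length]; exact h1) = a[r]'(by omega) := by
            rw [← Option.some_inj, ← List.getElem?_eq_getElem]
            exact fillN_get_at o idx a hnd r hr (by omega) h1
          have e2 : (fillN o idx a')[idx[r]]'(by rw [fillN_length]; exact h2) = a'[r]'(by omega) := by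
            rw [← Option.some_inj, ← List.getElem?_eq_getElem]
            exact fillN_get_at o idx a' hnd r hr (by omega) h2
          rw [e1, e2]
          rcases asgn_mem_yn _ a ha (a[r]'(by omega)) (List.getElem_mem _) with hy | hy <;>
            rcases asgn_mem_yn _ a' ha' (a'[r]'(by omega)) (List.getElem_mem _) with hy' | hy' <;>
              simp [hy, hy']
        · have g1 := fillN_get_notmem o idx a t hmem
          have g2 := fillN_get_notmem o idx a' t hmem
          have e : (fillN o idx a)[t]? = (fillN o idx a')[t]? := by rw [g1, g2]
          rw [List.getElem?_eq_getElem (by simpa [fillN_length] using h1),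
              List.getElem?_eq_getElem (by simpa [fillN_length] using h2)] at e
          rw [Option.some_injective _ e]
      · rw [← join_toList, ← join_toList, hk]
    exact List.map_injective_iff.mpr (fun _ _ h => String.toList_inj.mp h) hmaps
  -- hence the assignments are equal
  apply List.ext_getElem (by omega)
  intro t ht ht'
  have hb : idx[t]'(by omega) < o.length := hbnd _ (List.getElem_mem _)
  have g1 := fillN_get_at o idx a hnd t (by omega) ht hb
  have g2 := fillN_get_at o idx a' hnd t (by omega) ht' hb
  rw [hfl, g2] at g1
  exact (Option.some_injective _ g1).symm

theorem entries_keys_nodup (o : List String) :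
    ((entries o).map Prod.fst).Nodup := by
  have : (entries o).map Prod.fst
      = (asgn (midx 0 o).length).map (fun a => PySem.Str.join "" (fillN o (midx 0 o) a)) := by
    simp [entries, entryOf, Function.comp_def]
  rw [this]
  exact (asgn_nodup _).map_on (fun a ha a' ha' h => keys_inj o a a' ha ha' h)

theorem keysmap_nodup (o : List String) :
    ((asgn (midx 0 o).length).map (fun a => PySem.Str.join "" (fillN o (midx 0 o) a))).Nodup :=
  (asgn_nodup _).map_on (fun a ha a' ha' h => keys_inj o a a' ha ha' h)

theorem enum_midx (o : List String) (k : Nat) :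
    ((PySem.List.enumerate o (k : Int)).filter (fun p => p.2 == "m")).map Prod.fst
      = (midx k o).map (Nat.cast : Nat → Int) := by
  induction o generalizing k with
  | nil => rfl
  | cons s t ih =>
    rw [PySem.List.enumerate_cons]
    have hcast : ((k : Int) + 1) = ((k + 1 : Nat) : Int) := by push_cast; ring
    rw [hcast]
    by_cases hs : s = "m"
    · subst hs
      have h1 : List.filter (fun p => p.2 == "m")
            (((k : Int), "m") :: PySem.List.enumerate t ((k + 1 : Nat) : Int))
          = ((k : Int), "m") :: List.filter (fun p => p.2 == "m")
            (PySem.List.enumerate t ((k + 1 : Nat) : Int)) := by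
        rw [List.filter_cons_of_pos rfl]
      rw [h1, List.map_cons, ih (k+1),
        show midx k ("m" :: t) = k :: midx (k+1) t from by simp [midx], List.map_cons]
    · have h1 : List.filter (fun p => p.2 == "m")
            (((k : Int), s) :: PySem.List.enumerate t ((k + 1 : Nat) : Int))
          = List.filter (fun p => p.2 == "m") (PySem.List.enumerate t ((k + 1 : Nat) : Int)) := by
        rw [List.filter_cons_of_neg (by simpa using hs)]
      rw [h1, ih (k+1), show midx k (s :: t) = midx (k+1) t from by simp [midx, hs]]

theorem fill_bridge (o : List String) (idxN : List Nat) (a : List String) :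
    ((idxN.map (Nat.cast : Nat → Int)).zip a).foldl (fun c p => PySem.List.pySetD c p.1 p.2) o
      = fillN o idxN a := by
  rw [List.zip_map_left, List.foldl_map]
  simp only [Prod.map_fst, Prod.map_snd, id_eq, PySem.List.pySetD_natCast]
  rfl

theorem winners_alt_eq_entries (o : List String) : winners_alt o = entries o := by
  have hidx : ((PySem.List.enumerate o 0).filter (fun p => p.2 == "m")).map Prod.fst
      = (midx 0 o).map (Nat.cast : Nat → Int) := by
    have h0 : (0 : Int) = ((0 : Nat) : Int) := by norm_num
    rw [h0]
    exact enum_midx o 0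
  rw [winners_alt]
  rw [hidx]
  rw [show [([] : List String)] = asgn 0 from rfl, foldl_expand, List.length_map]
  simp only [Nat.zero_add, fill_bridge]
  rw [PySem.Dict.items_foldl_insert_fresh (asgn (midx 0 o).length)
    (fun a => PySem.Str.join "" (fillN o (midx 0 o) a))
    (fun a => champB (fillN o (midx 0 o) a)) (PySem.Dict.mk [])
    (fun a _ => rfl) (keysmap_nodup o)]
  simp [entries, entryOf]

theorem points_eq_score (r : List Int) (c : List String) : pointsA r c = scoreB r c := by
  unfold pointsA scoreB
  rw [PySem.List.foldl_if_eq_foldl_filter (p := fun p => p.2 == "y") (f := fun t (p : Int × String) => t + p.1)]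
  rw [PySem.List.foldl_add _ Prod.fst]
  simp

theorem winners_eq_entries_base (o : List String) (hm : "m" ∉ o) :
    winners o = entries o := by
  have hents : entries o = [(PySem.Str.join "" o, champB o)] := by
    simp [entries, midx_eq_nil 0 o hm, asgn, entryOf, fillN]
  rw [winners, dif_pos hm, hents]
  simp only [champB, points_eq_score, PySem.List.foldl_append_if, List.nil_append]
  split <;> simp_all

theorem entries_split (pre suf : List String) (hpre : "m" ∉ pre) :
    entries (pre ++ "m" :: suf)
      = entries (pre ++ "y" :: suf) ++ entries (pre ++ "n" :: suf) := by
  have hm0 : midx 0 (pre ++ "m" :: suf) = pre.length :: midx (pre.length + 1) suf := by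
    rw [midx_append, midx_eq_nil _ _ hpre]
    simp [midx]
  have hY : midx 0 (pre ++ "y" :: suf) = midx (pre.length + 1) suf := by
    rw [midx_append, midx_eq_nil _ _ hpre]
    simp [midx]
  have hN : midx 0 (pre ++ "n" :: suf) = midx (pre.length + 1) suf := by
    rw [midx_append, midx_eq_nil _ _ hpre]
    simp [midx]
  have hfill : ∀ (x : String) (a : List String),
      fillN (pre ++ "m" :: suf) (pre.length :: midx (pre.length + 1) suf) (x :: a)
        = fillN (pre ++ x :: suf) (midx (pre.length + 1) suf) a := by
    intro x a
    rw [fillN_cons, pv_set_append_cons]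
  simp only [entries, hm0, hY, hN, List.length_cons, asgn_succ, List.map_append, List.map_map]
  congr 1 <;>
    · apply List.map_congr_left
      intro a _
      simp [entryOf, hfill]

theorem winners_eq_entries (o : List String) : winners o = entries o := by
  suffices h : ∀ n o, List.count "m" o ≤ n → winners o = entries o from
    h (List.count "m" o) o le_rfl
  intro n
  induction n with
  | zero =>
    intro o hc
    exact winners_eq_entries_base o (by
      intro hmem
      have := (List.count_pos_iff).mpr hmem
      omega)
  | succ n ih =>
    intro o hc
    by_cases hm : "m" ∈ o
    · obtain ⟨j, hj⟩ := Option.isSome_iff_exists.mp ((PySem.List.index?_isSome_iff o "m").mpr hm)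
      obtain ⟨pre, suf, ho, hlen, hpre⟩ := (PySem.List.index?_eq_some_iff o "m" j).mp hj
      subst ho hlen
      have hcY : List.count "m" (pre ++ "y" :: suf) ≤ n := by
        have h1 : List.count "m" (pre ++ "m" :: suf)
            = List.count "m" pre + List.count "m" suf + 1 := by
          simp [List.count_append]
          omega
        have h2 : List.count "m" (pre ++ "y" :: suf)
            = List.count "m" pre + List.count "m" suf := by
          simp [List.count_append]
        omega
      have hcN : List.count "m" (pre ++ "n" :: suf) ≤ n := by
        have h1 : List.count "m" (pre ++ "m" :: suf)
            = List.count "m" pre + List.count "m" suf + 1 := by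
          simp [List.count_append]
          omega
        have h2 : List.count "m" (pre ++ "n" :: suf)
            = List.count "m" pre + List.count "m" suf := by
          simp [List.count_append]
        omega
      rw [winners, dif_neg (by simp [hm])]
      simp only [hj, Option.getD_some, pv_set_append_cons]
      rw [ih _ hcY, ih _ hcN]
      -- freshness of the `no` keys with respect to the `yes` dict
      have hnd : ((entries (pre ++ "y" :: suf)).map Prod.fst
          ++ (entries (pre ++ "n" :: suf)).map Prod.fst).Nodup := by
        have := entries_keys_nodup (pre ++ "m" :: suf)
        rwa [entries_split pre suf hpre, List.map_append] at this
      have hdisj := (List.nodup_append.mp hnd).2.2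
      have hfresh : ∀ kv ∈ entries (pre ++ "n" :: suf),
          (PySem.Dict.mk (entries (pre ++ "y" :: suf))).contains kv.1 = false := by
        intro kv hkv
        have hnotin : kv.1 ∉ (entries (pre ++ "y" :: suf)).map Prod.fst := by
          intro hin
          exact hdisj _ hin _ (List.mem_map_of_mem hkv) rfl
        simp only [PySem.Dict.contains]
        rw [List.any_eq_false]
        intro p hp
        simp only [beq_iff_eq]
        intro hpe
        exact hnotin (hpe ▸ List.mem_map_of_mem hp)
      have hnodupN : ((entries (pre ++ "n" :: suf)).map Prod.fst).Nodup :=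
        (List.nodup_append.mp hnd).2.1
      have := PySem.Dict.items_foldl_insert_fresh (entries (pre ++ "n" :: suf))
        Prod.fst Prod.snd (PySem.Dict.mk (entries (pre ++ "y" :: suf))) hfresh hnodupN
      rw [entries_split pre suf hpre]
      rw [show (fun (d : PySem.Dict String String) (kv : String × String) => d.insert kv.1 kv.2)
        = fun d kv => d.insert (Prod.fst kv) (Prod.snd kv) from rfl, this]
      simp
    · exact winners_eq_entries_base o hm

-- ===== VERDICT (by name: the statement is the Claim_ definition above) =====
theorem winners_spec : Claim_equal_winners := by
  intro o _
  unfold Spec_winners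
  rw [winners_eq_entries, winners_alt_eq_entries]
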